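-- pv_equiv track=rewrite | github.com/kimtaehong/TheWay | mysite/bsparser.py | findRow_csv
-- ===== SOURCE A (Python) =====
-- def findRow_csv(data):
--     lenTmp = 0
--     position = 0
--     for row in data:
--         row = row.split(',')
--         if lenTmp == len(row) and lenTmp > 3:
--             return position - 1
--         lenTmp = len(row)
--         position += 1
-- ===== SOURCE B (Python) =====
-- def findRow_csv(data):
--     lengths = [len(r.split(',')) for r in data]
--     i, n = 0, len(lengths)
--     while i < n:
--         j = i
--         while j < n and lengths[j] == lengths[i]:
--             j += 1
--         if j - i >= 2 and lengths[i] > 3: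
--             return i
--         i = j
-- ===== Notes on version B (the rewrite author's own statement) =====
-- stated objective: alternative
-- what changed: A compares each row's comma-count to the previous one in a single state-carrying pass; B first materialises the column-count sequence, then walks it run by run (run-length grouping with an inner while advancing to the run's end) and returns the start index of the first run of length >= 2 whose value exceeds 3.
import Mathlib
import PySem

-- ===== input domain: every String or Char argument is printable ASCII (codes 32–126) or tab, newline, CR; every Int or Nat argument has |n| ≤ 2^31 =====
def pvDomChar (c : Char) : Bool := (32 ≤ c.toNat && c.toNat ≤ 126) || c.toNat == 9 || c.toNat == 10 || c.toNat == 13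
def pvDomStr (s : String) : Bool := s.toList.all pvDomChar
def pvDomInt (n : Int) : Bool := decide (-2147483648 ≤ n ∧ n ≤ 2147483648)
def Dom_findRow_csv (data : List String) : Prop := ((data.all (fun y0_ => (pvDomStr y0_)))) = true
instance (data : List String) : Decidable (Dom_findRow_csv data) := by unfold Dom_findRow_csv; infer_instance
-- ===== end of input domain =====

-- B replaces A's prev/cur state-carrying pass by a run-length walk over the column-count
-- sequence, returning the start of the first run of length ≥ 2 with value > 3; same cost.

-- ===== PORT A =====
-- A's loop with state (lenTmp, position), transliterated as structural recursion.
def findRow_csv_go (data : List String) (lenTmp : Int) (position : Int) : Option Int :=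
  match data with
  | [] => none
  | row :: rest =>
    let r := ((PySem.Str.split? row ",").getD [])
    if lenTmp = (r.length : Int) ∧ lenTmp > 3 then some (position - 1)
    else findRow_csv_go rest (r.length : Int) (position + 1)

def findRow_csv (data : List String) : Option Int :=
  findRow_csv_go data 0 0

-- ===== PORT B =====
-- inner while loop of B: consume the prefix equal to v, returning (run length - 1 beyond head, remainder)
def findRow_takeRun (v : Int) : List Int → Nat × List Int
  | [] => (0, [])
  | x :: t =>
    if x = v then ((findRow_takeRun v t).1 + 1, (findRow_takeRun v t).2)
    else (0, x :: t)

-- termination measure for the outer while loop (cited by findRow_runScan's decreasing_by)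
theorem findRow_takeRun_len (v : Int) (t : List Int) :
    (findRow_takeRun v t).2.length ≤ t.length := by
  induction t with
  | nil => simp [findRow_takeRun]
  | cons x t ih =>
    simp only [findRow_takeRun]
    split
    · exact Nat.le_succ_of_le ih
    · exact Nat.le_refl _

-- outer while loop of B: walk the length sequence run by run
def findRow_runScan : List Int → Int → Option Int
  | [], _ => none
  | x :: t, i =>
    let k := (findRow_takeRun x t).1
    if k + 1 ≥ 2 ∧ x > 3 then some i
    else findRow_runScan (findRow_takeRun x t).2 (i + (k : Int) + 1)
termination_by l _ => l.length
decreasing_by exact Nat.lt_succ_of_le (findRow_takeRun_len x t)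

def findRow_csv_alt (data : List String) : Option Int :=
  let lengths := data.map (fun r => ((((PySem.Str.split? r ",").getD [])).length : Int))
  findRow_runScan lengths 0

-- ===== PRECONDITION & SPEC =====
def Spec_findRow_csv (data : List String) (out : Option Int) : Prop := out = findRow_csv_alt data
instance (data : List String) (out : Option Int) : Decidable (Spec_findRow_csv data out) := by unfold Spec_findRow_csv; infer_instance

-- ===== CLAIM (what is proved, stated in full; the proofs are below) =====
def Claim_equal_findRow_csv : Prop := ∀ (data : List String), Dom_findRow_csv data → Spec_findRow_csv data (findRow_csv data)

-- ===== LEMMAS AND PROOFS =====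
-- A's loop restated over the list of column counts
def pvGoL : List Int → Int → Int → Option Int
  | [], _, _ => none
  | x :: t, prev, pos =>
    if prev = x ∧ prev > 3 then some (pos - 1) else pvGoL t x (pos + 1)

theorem findRow_csv_go_eq_goL (data : List String) (prev pos : Int) :
    findRow_csv_go data prev pos
      = pvGoL (data.map (fun r => ((((PySem.Str.split? r ",").getD [])).length : Int))) prev pos := by
  induction data generalizing prev pos with
  | nil => rfl
  | cons row rest ih =>
    simp only [findRow_csv_go, pvGoL, List.map]
    split
    · rfl
    · exact ih _ _

theorem findRow_takeRun_head (v : Int) (t : List Int) (y : Int)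
    (h : (findRow_takeRun v t).2.head? = some y) : y ≠ v := by
  induction t with
  | nil => simp [findRow_takeRun] at h
  | cons x t ih =>
    by_cases hx : x = v
    · simp only [findRow_takeRun, if_pos hx] at h
      exact ih h
    · simp only [findRow_takeRun, if_neg hx, List.head?] at h
      cases h
      exact hx

-- consuming one run: A's loop restarted after an element x behaves like "skip the run of x"
theorem pvGoL_run (t : List Int) (x i : Int) :
    pvGoL t x (i + 1)
      = if (findRow_takeRun x t).1 ≥ 1 ∧ x > 3 then some i
        else pvGoL (findRow_takeRun x t).2 x (i + 1 + ((findRow_takeRun x t).1 : Int)) := by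
  induction t generalizing i with
  | nil =>
    simp [findRow_takeRun, pvGoL]
  | cons y t ih =>
    by_cases hy : y = x
    · rw [hy, findRow_takeRun, if_pos rfl, pvGoL]
      by_cases hx : x > 3
      · rw [if_pos ⟨rfl, hx⟩, if_pos ⟨by omega, hx⟩]
        congr 1
        omega
      · rw [if_neg (fun h => hx h.2), if_neg (fun h => hx h.2)]
        have hstep := ih (i + 1)
        rw [if_neg (fun h => hx h.2)] at hstep
        rw [hstep]
        congr 1
        push_cast
        ring
    · rw [findRow_takeRun, if_neg hy]
      rw [if_neg (by rintro ⟨h1, _⟩; omega)]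
      norm_num

-- main bridge: from a "fresh" state (prev cannot fire on the head), A's loop equals B's run walk
theorem pvGoL_eq_runScan (n : Nat) :
    ∀ (l : List Int), l.length ≤ n → ∀ (i prev : Int),
      (∀ y, l.head? = some y → ¬(prev = y ∧ prev > 3)) →
      pvGoL l prev i = findRow_runScan l i := by
  induction n with
  | zero =>
    intro l hl i prev _
    have : l = [] := List.eq_nil_of_length_eq_zero (Nat.le_zero.mp hl)
    subst this; simp [pvGoL, findRow_runScan]
  | succ n ih =>
    intro l hl i prev h
    cases l with
    | nil => simp [pvGoL, findRow_runScan]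
    | cons x t =>
      have hfresh := h x rfl
      rw [pvGoL, if_neg hfresh]
      have hrun := pvGoL_run t x i
      rw [findRow_runScan]
      by_cases hcond : (findRow_takeRun x t).1 ≥ 1 ∧ x > 3
      · rw [if_pos hcond] at hrun
        rw [hrun, if_pos (by exact ⟨by omega, hcond.2⟩)]
      · rw [if_neg hcond] at hrun
        rw [hrun, if_neg (by rintro ⟨h1, h2⟩; exact hcond ⟨by omega, h2⟩)]
        have hlen : (findRow_takeRun x t).2.length ≤ n := by
          have := findRow_takeRun_len x t
          simpa using Nat.le_trans this (Nat.le_of_succ_le_succ hl)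
        have := ih (findRow_takeRun x t).2 hlen (i + ((findRow_takeRun x t).1 : Int) + 1) x
          (by
            intro y hy ⟨heq, _⟩
            exact findRow_takeRun_head x t y hy (heq ▸ rfl))
        rw [← this]
        congr 1
        ring

-- ===== VERDICT (by name: the statement is the Claim_ definition above) =====
theorem findRow_csv_spec : Claim_equal_findRow_csv := by
  intro data _
  unfold Spec_findRow_csv findRow_csv findRow_csv_alt
  rw [findRow_csv_go_eq_goL]
  exact pvGoL_eq_runScan _ _ (Nat.le_refl _) 0 0 (by rintro y _ ⟨rfl, h⟩; omega)
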